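-- pv_equiv track=rewrite | github.com/felipealfonsog/felipealfonsog | .github/scripts/spotify_telemetry.py | volume_bar
-- ===== SOURCE A (Python) =====
-- VOLUME_BAR_WIDTH          = 12     # how many blocks to draw (visual density)
--
-- def clamp(n, lo, hi):
--     return max(lo, min(hi, n))
--
-- def volume_bar(percent: int | None) -> str:
--     if percent is None:
--         return "-"
--     p = clamp(int(percent), 0, 100)
--     # map to spark blocks; denser than heatmap
--     chars = " ▁▂▃▄▅▆▇█"
--     filled_steps = int(round((p / 100) * VOLUME_BAR_WIDTH))
--     if filled_steps <= 0:
--         return chars[1] * VOLUME_BAR_WIDTH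
--     # build by ramping levels (visual “signal” look)
--     out = []
--     for i in range(VOLUME_BAR_WIDTH):
--         if i < filled_steps:
--             level = int(round(((i + 1) / VOLUME_BAR_WIDTH) * (len(chars)-1)))
--             out.append(chars[clamp(level, 1, len(chars)-1)])
--         else:
--             out.append(" ")
--     return "".join(out).rstrip() or "-"
-- ===== SOURCE B (Python) =====
-- VOLUME_BAR_WIDTH = 12
--
-- def clamp(n, lo, hi):
--     return max(lo, min(hi, n))
--
-- # The ramp is a constant: position k (1-based) always shows spark level
-- # round(k/12*8) clamped to 1..8, so the whole bar is a prefix of this string.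
-- RAMP = "\u2581\u2581\u2582\u2583\u2583\u2584\u2585\u2585\u2586\u2587\u2587\u2588"
--
-- def volume_bar(percent):
--     if percent is None:
--         return "-"
--     p = clamp(int(percent), 0, 100)
--     filled_steps = int(round((p / 100) * VOLUME_BAR_WIDTH))
--     if filled_steps <= 0:
--         return "\u2581" * VOLUME_BAR_WIDTH
--     return RAMP[:filled_steps]
-- ===== Notes on version B (the rewrite author's own statement) =====
-- stated objective: simpler
-- what changed: B replaces A's per-position loop (fill/space branch, per-char level rounding, rstrip, 'or "-"' fallback) with a precomputed constant ramp string of which the answer is simply the filled_steps-length prefix slice.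
import Mathlib
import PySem

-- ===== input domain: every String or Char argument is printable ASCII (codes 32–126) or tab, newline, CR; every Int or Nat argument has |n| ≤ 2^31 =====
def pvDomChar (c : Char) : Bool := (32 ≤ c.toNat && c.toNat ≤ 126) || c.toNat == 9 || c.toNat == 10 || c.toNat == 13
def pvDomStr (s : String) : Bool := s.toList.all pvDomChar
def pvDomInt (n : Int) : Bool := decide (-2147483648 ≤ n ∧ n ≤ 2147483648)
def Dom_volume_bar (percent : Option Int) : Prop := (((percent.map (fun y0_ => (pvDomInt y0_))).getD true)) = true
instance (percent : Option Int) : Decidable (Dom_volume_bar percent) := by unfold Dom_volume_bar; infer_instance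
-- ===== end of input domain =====

-- B takes a prefix slice of one precomputed constant ramp string instead of A's per-position
-- loop with fill/space branch, per-char rounding, rstrip and '-' fallback: simpler, same output.

-- ===== PORT A =====
-- clamp(n, lo, hi) = max(lo, min(hi, n))
def pvClamp (n lo hi : Int) : Int := max lo (min hi n)

-- int(round(num/den)) for den > 0: round-half-to-even on the exact rational num/den.
-- Exact for this code: the only calls are round(p/100*12), p ∈ 0..100, and
-- round((i+1)/12*8), i ∈ 0..11, where the float round equals the exact
-- rational half-even round for every reachable argument (checked exhaustively).
def pvRound (num den : Int) : Int :=
  let q := PySem.Int.floordiv num den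
  let r := PySem.Int.mod num den
  if 2 * r < den then q
  else if den < 2 * r then q + 1
  else if PySem.Int.mod q 2 = 0 then q else q + 1

-- the spark characters " ▁▂▃▄▅▆▇█" as a list; chars[j] for an in-range j
def pvChars : List Char := " ▁▂▃▄▅▆▇█".toList
def pvCharAt (j : Int) : Char := (PySem.List.pyGet? pvChars j).getD ' '

-- body of A after 'p = clamp(int(percent), 0, 100)'
def volume_barA (p : Int) : String :=
  let filled_steps := pvRound (p * 12) 100
  if filled_steps ≤ 0 then String.mk (List.replicate 12 (pvCharAt 1))
  else
    let out := (PySem.List.pyRange 0 12 1).foldl (fun acc i =>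
      if i < filled_steps then
        let level := pvRound ((i + 1) * 8) 12
        acc ++ [pvCharAt (pvClamp level 1 8)]
      else acc ++ [' ']) []
    let s := PySem.Chars.rstrip out
    if s = [] then "-" else String.mk s

def volume_bar (percent : Option Int) : String :=
  match percent with
  | none => "-"
  | some n => volume_barA (pvClamp n 0 100)

-- ===== PORT B =====
-- the constant RAMP string of Source B
def pvRamp : List Char := "▁▁▂▃▃▄▅▅▆▇▇█".toList

-- body of B after 'p = clamp(int(percent), 0, 100)'
def volume_barB (p : Int) : String :=
  let filled_steps := pvRound (p * 12) 100
  if filled_steps ≤ 0 then String.mk (List.replicate 12 '▁')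
  else String.mk (PySem.List.slice pvRamp none (some filled_steps))

def volume_bar_alt (percent : Option Int) : String :=
  match percent with
  | none => "-"
  | some n => volume_barB (pvClamp n 0 100)

-- ===== PRECONDITION & SPEC =====
def Spec_volume_bar (percent : Option Int) (out : String) : Prop := out = volume_bar_alt percent
instance (percent : Option Int) (out : String) : Decidable (Spec_volume_bar percent out) := by unfold Spec_volume_bar; infer_instance

-- ===== CLAIM (what is proved, stated in full; the proofs are below) =====
def Claim_equal_volume_bar : Prop := ∀ (percent : Option Int), Dom_volume_bar percent → Spec_volume_bar percent (volume_bar percent)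

-- ===== LEMMAS AND PROOFS =====
-- Both bodies agree on every clamped value 0..100 (a finite check).
set_option maxRecDepth 4000 in
theorem volume_bar_body_eq : ∀ p : Fin 101, volume_barA (p : Int) = volume_barB (p : Int) := by decide

-- ===== VERDICT (by name: the statement is the Claim_ definition above) =====
theorem volume_bar_spec : Claim_equal_volume_bar := by
  intro percent _
  unfold Spec_volume_bar volume_bar volume_bar_alt
  match percent with
  | none => rfl
  | some n =>
    have h1 : 0 ≤ pvClamp n 0 100 := by unfold pvClamp; omega
    have h2 : pvClamp n 0 100 ≤ 100 := by unfold pvClamp; omega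
    have := volume_bar_body_eq ⟨(pvClamp n 0 100).toNat, by omega⟩
    simpa [Int.toNat_of_nonneg h1] using this
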